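-- pv_equiv track=rewrite | github.com/robotcodedev/robotcode | packages/robot/src/robotcode/robot/utils/ast.py | iter_over_keyword_names_and_owners
-- ===== SOURCE A (Python) =====
-- from typing import Any, Dict, Iterator, List, Optional, Sequence, Set, Tuple, Type, TypeVar, Union
--
-- def iter_over_keyword_names_and_owners(
--     full_name: str,
-- ) -> Iterator[Tuple[Optional[str], ...]]:
--     yield None, full_name
--
--     tokens = full_name.split(".")
--     if len(tokens) > 1:
--         for i in range(1, len(tokens)):
--             yield ".".join(tokens[:i]), ".".join(tokens[i:])
-- ===== SOURCE B (Python) =====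
-- def iter_over_keyword_names_and_owners(full_name):
--     yield None, full_name
--     for i, ch in enumerate(full_name):
--         if ch == ".":
--             yield full_name[:i], full_name[i + 1:]
-- ===== Notes on version B (the rewrite author's own statement) =====
-- stated objective: idiomatic
-- what changed: B scans the string once and slices the original string at each dot position it meets, instead of splitting into a token list and re-joining prefix/suffix token slices for every split point.
import Mathlib
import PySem

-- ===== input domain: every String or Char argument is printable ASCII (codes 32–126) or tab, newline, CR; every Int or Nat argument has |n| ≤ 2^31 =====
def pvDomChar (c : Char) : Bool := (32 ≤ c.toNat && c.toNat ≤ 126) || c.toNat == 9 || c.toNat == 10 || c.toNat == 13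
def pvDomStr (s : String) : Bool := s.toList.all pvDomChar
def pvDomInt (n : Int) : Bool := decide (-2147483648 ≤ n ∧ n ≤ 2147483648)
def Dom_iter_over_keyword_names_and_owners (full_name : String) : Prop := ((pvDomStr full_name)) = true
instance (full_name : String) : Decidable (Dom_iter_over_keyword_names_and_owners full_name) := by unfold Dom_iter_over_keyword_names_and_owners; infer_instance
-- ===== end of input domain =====

-- ===== PORT A =====
-- B changes the traversal: it finds '.' positions in one scan and slices the original
-- string, instead of splitting into tokens and re-joining (objective: idiomatic).
def iter_over_keyword_names_and_owners (full_name : String) : List (List (Option String)) :=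
  let out : List (List (Option String)) := [[none, some full_name]]
  let tokens : List (List Char) := PySem.Chars.splitOn full_name.toList ['.']
  if tokens.length > 1 then
    out ++ (PySem.List.pyRange 1 (tokens.length : Int) 1).foldl
      (fun acc i =>
        acc ++ [[some (String.ofList (PySem.Chars.join ['.'] (PySem.List.slice tokens none (some i)))),
                 some (String.ofList (PySem.Chars.join ['.'] (PySem.List.slice tokens (some i) none)))]]) []
  else out

-- ===== PORT B =====
def iter_over_keyword_names_and_owners_alt (full_name : String) : List (List (Option String)) :=
  [none, some full_name] ::
    (PySem.List.enumerate full_name.toList).foldl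
      (fun acc p =>
        if p.2 == '.' then
          acc ++ [[some (String.ofList (PySem.List.slice full_name.toList none (some p.1))),
                   some (String.ofList (PySem.List.slice full_name.toList (some (p.1 + 1)) none))]]
        else acc) []

-- ===== PRECONDITION & SPEC =====
def Spec_iter_over_keyword_names_and_owners (full_name : String) (out : List (List (Option String))) : Prop := out = iter_over_keyword_names_and_owners_alt full_name
instance (full_name : String) (out : List (List (Option String))) : Decidable (Spec_iter_over_keyword_names_and_owners full_name out) := by unfold Spec_iter_over_keyword_names_and_owners; infer_instance

-- ===== CLAIM (what is proved, stated in full; the proofs are below) =====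
def Claim_equal_iter_over_keyword_names_and_owners : Prop := ∀ (full_name : String), Dom_iter_over_keyword_names_and_owners full_name → Spec_iter_over_keyword_names_and_owners full_name (iter_over_keyword_names_and_owners full_name)

-- ===== LEMMAS AND PROOFS =====

-- Recursive characterisation of splitting on a single '.' (proof-side only).
def pvSplit : List Char → List (List Char)
  | [] => [[]]
  | c :: cs => if c = '.' then [] :: pvSplit cs else (pvSplit cs).modifyHead (c :: ·)

-- The (prefix, suffix) pairs at each '.' of the input, in order (common spec).
def pvDotPairs : List Char → List (List Char × List Char)
  | [] => []
  | c :: cs =>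
      (if c = '.' then [([], cs)] else []) ++ (pvDotPairs cs).map (fun q => (c :: q.1, q.2))

theorem pvSplit_ne_nil (cs : List Char) : pvSplit cs ≠ [] := by
  induction cs with
  | nil => simp [pvSplit]
  | cons c cs ih =>
    simp only [pvSplit]
    split
    · simp
    · cases h : pvSplit cs with
      | nil => exact absurd h ih
      | cons a t => simp [List.modifyHead_cons]

theorem pvSplitOn_go_eq (cs : List Char) : ∀ (fuel : Nat) (cur : List Char) (acc : List (List Char)),
    cs.length < fuel →
    PySem.Chars.splitOn.go ['.'] fuel cs cur acc
      = acc.reverse ++ (pvSplit cs).modifyHead (cur.reverse ++ ·) := by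
  induction cs with
  | nil =>
    intro fuel cur acc h
    cases fuel with
    | zero => omega
    | succ f =>
      rw [PySem.Chars.splitOn.go]
      simp [pvSplit]
      all_goals omega
  | cons c rest ih =>
    intro fuel cur acc h
    cases fuel with
    | zero => omega
    | succ f =>
      rw [PySem.Chars.splitOn.go]
      by_cases hc : c = '.'
      · subst hc
        have hp : List.isPrefixOf ['.'] ('.' :: rest) = true := by
          simp [List.isPrefixOf]
        simp only [hp, if_true]
        rw [show List.drop (['.'] : List Char).length ('.' :: rest) = rest from by simp]
        rw [ih f [] (cur.reverse :: acc) (by simp at h ⊢; omega)]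
        cases hsp : pvSplit rest with
        | nil => exact absurd hsp (pvSplit_ne_nil rest)
        | cons a t => simp [pvSplit, hsp]
      · have hp : List.isPrefixOf ['.'] (c :: rest) = false := by
          simp only [List.isPrefixOf, Bool.and_eq_false_iff]
          left
          simp
          exact fun h' => hc h'.symm
        simp only [hp, Bool.false_eq_true, if_false]
        rw [ih f (c :: cur) acc (by simp at h ⊢; omega)]
        cases hsp : pvSplit rest with
        | nil => exact absurd hsp (pvSplit_ne_nil rest)
        | cons a t => simp [pvSplit, hc, hsp]

theorem pvSplitOn_eq (cs : List Char) : PySem.Chars.splitOn cs ['.'] = pvSplit cs := by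
  unfold PySem.Chars.splitOn
  rw [pvSplitOn_go_eq cs (cs.length + 1) [] [] (by omega)]
  cases hsp : pvSplit cs with
  | nil => exact absurd hsp (pvSplit_ne_nil cs)
  | cons a t => simp

theorem pvJoin_cons (p : List Char) (L : List (List Char)) (h : L ≠ []) :
    PySem.Chars.join ['.'] (p :: L) = p ++ '.' :: PySem.Chars.join ['.'] L := by
  cases L with
  | nil => exact absurd rfl h
  | cons q t => rw [PySem.Chars.join_cons_cons]; simp

theorem pvJoin_modifyHead (c : Char) (L : List (List Char)) (h : L ≠ []) :
    PySem.Chars.join ['.'] (L.modifyHead (c :: ·)) = c :: PySem.Chars.join ['.'] L := by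
  cases L with
  | nil => exact absurd rfl h
  | cons a t =>
    rw [List.modifyHead_cons]
    cases t with
    | nil => simp [PySem.Chars.join_singleton]
    | cons b t' => rw [PySem.Chars.join_cons_cons, PySem.Chars.join_cons_cons]; simp

theorem pvJoin_pvSplit (cs : List Char) : PySem.Chars.join ['.'] (pvSplit cs) = cs := by
  induction cs with
  | nil => simp [pvSplit, PySem.Chars.join_singleton]
  | cons c cs ih =>
    simp only [pvSplit]
    by_cases hc : c = '.'
    · subst hc
      rw [if_pos rfl, pvJoin_cons [] _ (pvSplit_ne_nil cs), ih]
      simp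
    · rw [if_neg hc, pvJoin_modifyHead c _ (pvSplit_ne_nil cs), ih]

theorem pvA_pairs (cs : List Char) :
    (List.range ((pvSplit cs).length - 1)).map
        (fun k => (PySem.Chars.join ['.'] ((pvSplit cs).take (k+1)),
                   PySem.Chars.join ['.'] ((pvSplit cs).drop (k+1))))
      = pvDotPairs cs := by
  induction cs with
  | nil => simp [pvSplit, pvDotPairs]
  | cons c cs ih =>
    have hS := pvSplit_ne_nil cs
    by_cases hc : c = '.'
    · subst hc
      rw [show pvSplit ('.' :: cs) = [] :: pvSplit cs from by simp [pvSplit],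
          show pvDotPairs ('.' :: cs)
              = ([], cs) :: (pvDotPairs cs).map (fun q => ('.' :: q.1, q.2)) from by
            simp [pvDotPairs],
          List.length_cons, Nat.add_sub_cancel,
          show (pvSplit cs).length = ((pvSplit cs).length - 1) + 1 from
            (Nat.succ_pred_eq_of_pos (List.length_pos_of_ne_nil hS)).symm,
          List.range_succ_eq_map, List.map_cons]
      congr 1
      · simp [List.take_succ_cons, List.drop_succ_cons, PySem.Chars.join_singleton,
          pvJoin_pvSplit]
      · rw [← ih]
        simp only [List.map_map]
        apply List.map_congr_left
        intro k _
        simp only [Function.comp_apply, Nat.succ_eq_add_one, List.take_succ_cons,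
          List.drop_succ_cons]
        rw [pvJoin_cons [] _ (by simp [List.take_eq_nil_iff, hS])]
        simp
    · rw [show pvSplit (c :: cs) = (pvSplit cs).modifyHead (c :: ·) from by
            simp [pvSplit, hc],
          show pvDotPairs (c :: cs) = (pvDotPairs cs).map (fun q => (c :: q.1, q.2)) from by
            simp [pvDotPairs, hc],
          List.length_modifyHead, ← ih]
      simp only [List.map_map]
      apply List.map_congr_left
      intro k _
      obtain ⟨a, t, hsp⟩ : ∃ a t, pvSplit cs = a :: t := by
        cases h' : pvSplit cs with
        | nil => exact absurd h' hS
        | cons a t => exact ⟨a, t, rfl⟩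
      rw [hsp]
      simp only [List.modifyHead_cons, Function.comp_apply, List.take_succ_cons,
        List.drop_succ_cons]
      rw [show ((c :: a) :: List.take k t) = (a :: List.take k t).modifyHead (c :: ·) from rfl,
          pvJoin_modifyHead c _ (by simp)]

theorem pvB_pairs (cs : List Char) : ∀ (pre : List Char),
    ((PySem.List.enumerate cs (pre.length : Int)).filter (fun p => p.2 == '.')).map
        (fun p => [some (String.ofList (PySem.List.slice (pre ++ cs) none (some p.1))),
                   some (String.ofList (PySem.List.slice (pre ++ cs) (some (p.1 + 1)) none))])
      = (pvDotPairs cs).map (fun q => [some (String.ofList (pre ++ q.1)), some (String.ofList q.2)]) := by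
  induction cs with
  | nil => intro pre; simp [PySem.List.enumerate_nil, pvDotPairs]
  | cons c cs ih =>
    intro pre
    have hcast : (pre.length : Int) + 1 = ((pre ++ [c]).length : Int) := by simp
    have happ : pre ++ c :: cs = (pre ++ [c]) ++ cs := by simp
    by_cases hc : c = '.'
    · subst hc
      rw [PySem.List.enumerate_cons,
          show pvDotPairs ('.' :: cs)
              = ([], cs) :: (pvDotPairs cs).map (fun q => ('.' :: q.1, q.2)) from by
            simp [pvDotPairs],
          show List.filter (fun p => p.2 == '.')
                (((pre.length : Int), '.') :: PySem.List.enumerate cs ((pre.length : Int) + 1))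
              = ((pre.length : Int), '.')
                  :: List.filter (fun p => p.2 == '.')
                      (PySem.List.enumerate cs ((pre.length : Int) + 1)) from by
            simp,
          List.map_cons, List.map_cons]
      congr 1
      · rw [PySem.List.slice_to_natCast, hcast, PySem.List.slice_from_natCast,
            show List.drop (pre ++ ['.']).length (pre ++ '.' :: cs) = cs from by
              rw [happ]; exact List.drop_left,
            List.take_left]
        simp
      · rw [hcast, happ, ih (pre ++ ['.']), List.map_map]
        apply List.map_congr_left
        intro q _
        simp
    · rw [PySem.List.enumerate_cons,
          show pvDotPairs (c :: cs) = (pvDotPairs cs).map (fun q => (c :: q.1, q.2)) from by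
            simp [pvDotPairs, hc],
          show List.filter (fun p => p.2 == '.')
                (((pre.length : Int), c) :: PySem.List.enumerate cs ((pre.length : Int) + 1))
              = List.filter (fun p => p.2 == '.')
                  (PySem.List.enumerate cs ((pre.length : Int) + 1)) from by
            simp [hc],
          hcast, happ, ih (pre ++ [c]), List.map_map]
      apply List.map_congr_left
      intro q _
      simp

theorem pvA_eq (s : String) :
    iter_over_keyword_names_and_owners s
      = [none, some s] ::
          (pvDotPairs s.toList).map
            (fun q => [some (String.ofList q.1), some (String.ofList q.2)]) := by
  simp only [iter_over_keyword_names_and_owners]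
  rw [pvSplitOn_eq]
  have hpos := List.length_pos_of_ne_nil (pvSplit_ne_nil s.toList)
  by_cases h : (pvSplit s.toList).length > 1
  · rw [if_pos h, PySem.List.foldl_append_singleton_eq_map, PySem.List.pyRange_one,
        show (((pvSplit s.toList).length : Int) - 1).toNat = (pvSplit s.toList).length - 1 from by
          omega,
        List.map_map, List.nil_append, List.singleton_append]
    congr 1
    rw [← pvA_pairs s.toList, List.map_map]
    apply List.map_congr_left
    intro k _
    simp only [Function.comp_apply]
    rw [show (1 : Int) + (k : Int) = ((k + 1 : Nat) : Int) from by push_cast; ring,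
        PySem.List.slice_to_natCast, PySem.List.slice_from_natCast]
  · rw [if_neg h]
    have hdot : pvDotPairs s.toList = [] := by
      rw [← pvA_pairs s.toList, show (pvSplit s.toList).length - 1 = 0 from by omega]
      simp
    simp [hdot]

theorem pvB_eq (s : String) :
    iter_over_keyword_names_and_owners_alt s
      = [none, some s] ::
          (pvDotPairs s.toList).map
            (fun q => [some (String.ofList q.1), some (String.ofList q.2)]) := by
  simp only [iter_over_keyword_names_and_owners_alt]
  have hfold := PySem.List.foldl_append_if
      (fun p : Int × Char => p.2 == '.')
      (fun p : Int × Char =>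
        [some (String.ofList (PySem.List.slice s.toList none (some p.1))),
         some (String.ofList (PySem.List.slice s.toList (some (p.1 + 1)) none))])
      (PySem.List.enumerate s.toList 0) []
  simp only [List.nil_append] at hfold
  rw [hfold]
  have h := pvB_pairs s.toList []
  simp only [List.length_nil, Nat.cast_zero, List.nil_append] at h
  rw [h]

-- ===== VERDICT (by name: the statement is the Claim_ definition above) =====
theorem iter_over_keyword_names_and_owners_spec : Claim_equal_iter_over_keyword_names_and_owners := by
  intro s _
  unfold Spec_iter_over_keyword_names_and_owners
  rw [pvA_eq, pvB_eq]
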